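-- pv_equiv track=rewrite | github.com/mynamerahulkumar/HackerRank | String/game_of_thrones_1.py | gameOfThrones
-- ===== SOURCE A (Python) =====
-- from collections import Counter
--
-- def gameOfThrones(s):
--     # Complete this function
--     counts=Counter(s)
--     cnt=0
--     for x in counts.values():
--         if(x%2!=0):
--             cnt+=1
--     if(cnt>1):
--         return  "NO"
--     else:
--         return "YES"
-- ===== SOURCE B (Python) =====
-- def _oddRuns(t):
--     # t is sorted, so equal characters are adjacent: count runs of odd length
--     if not t:
--         return 0
--     c = t[0]
--     i = 1
--     while i < len(t) and t[i] == c: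
--         i += 1
--     return i % 2 + _oddRuns(t[i:])
--
-- def gameOfThrones(s):
--     return "YES" if _oddRuns(sorted(s)) <= 1 else "NO"
-- ===== Notes on version B (the rewrite author's own statement) =====
-- stated objective: alternative
-- what changed: Instead of building a Counter and scanning its values for odd counts, B sorts the characters and recursively consumes maximal runs of equal adjacent characters, summing the parities of the run lengths.
import Mathlib
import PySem

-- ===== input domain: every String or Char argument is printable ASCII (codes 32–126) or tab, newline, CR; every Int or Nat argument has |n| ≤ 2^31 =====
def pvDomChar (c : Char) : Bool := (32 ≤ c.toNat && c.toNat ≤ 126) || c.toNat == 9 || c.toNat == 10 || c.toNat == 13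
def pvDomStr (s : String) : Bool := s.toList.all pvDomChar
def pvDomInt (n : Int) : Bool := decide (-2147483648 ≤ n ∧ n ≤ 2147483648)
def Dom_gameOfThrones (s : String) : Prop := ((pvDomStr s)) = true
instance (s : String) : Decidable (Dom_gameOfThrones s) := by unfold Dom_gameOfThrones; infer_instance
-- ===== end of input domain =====

-- B replaces A's Counter-then-scan-values tally with a different algorithm:
-- sort the characters, then recursively consume maximal runs of equal adjacent
-- characters, summing the parities of the run lengths (alternative; O(n log n)).

-- ===== PORT A =====
def gameOfThrones (s : String) : String :=
  if ((PySem.Dict.counter s.toList).values.foldl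
        (fun cnt x => if PySem.Int.mod x 2 ≠ 0 then cnt + 1 else cnt) 0 : Int) > 1
  then "NO" else "YES"

-- ===== PORT B =====
-- B-side helper _oddRuns: 'i' after the inner while-loop is 1 + the number of
-- further copies of t[0] at the front (the takeWhile length); 't[i:]' is the
-- remainder after the run (the dropWhile).
def pvOddRuns : List Char → Nat
  | [] => 0
  | c :: t =>
      (1 + (t.takeWhile (· == c)).length) % 2 + pvOddRuns (t.dropWhile (· == c))
termination_by t => t.length
decreasing_by
  exact Nat.lt_succ_of_le (List.length_dropWhile_le _ _)

def gameOfThrones_alt (s : String) : String :=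
  if pvOddRuns (PySem.List.sorted s.toList (fun c => c) false) ≤ 1 then "YES" else "NO"

-- ===== PRECONDITION & SPEC =====
def Spec_gameOfThrones (s : String) (out : String) : Prop := out = gameOfThrones_alt s
instance (s : String) (out : String) : Decidable (Spec_gameOfThrones s out) := by unfold Spec_gameOfThrones; infer_instance

-- ===== CLAIM (what is proved, stated in full; the proofs are below) =====
def Claim_equal_gameOfThrones : Prop := ∀ (s : String), Dom_gameOfThrones s → Spec_gameOfThrones s (gameOfThrones s)

-- ===== LEMMAS AND PROOFS =====

-- A's loop over the Counter's values counts exactly the distinct characters of the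
-- string whose multiplicity is odd.
lemma a_cnt_eq (l : List Char) :
    ((PySem.Dict.counter l).values.foldl
        (fun cnt x => if PySem.Int.mod x 2 ≠ 0 then cnt + 1 else cnt) 0 : Int)
      = ((PySem.Set.ofList l).countP (fun c => decide (l.count c % 2 = 1)) : Int) := by
  have hnd := PySem.Dict.nodup_keys_counter l
  rw [PySem.List.foldl_ite_add_one (p := fun x => PySem.Int.mod x 2 ≠ 0),
      PySem.Dict.values_eq_map_keys _ hnd 0, PySem.Dict.keys_counter, List.countP_map]
  rw [List.countP_congr (q := fun c => decide (l.count c % 2 = 1)) ?_]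
  · simp
  · intro c _
    simp only [Function.comp_apply, PySem.Dict.getD_counter, decide_eq_true_eq]
    rcases Nat.mod_two_eq_zero_or_one (l.count c) with h | h <;> simp [h] <;> omega

-- In a sorted (Pairwise ≤) list headed by c, the part after the initial run of
-- c's contains no further c.
lemma count_dropWhile_zero (c : Char) (t : List Char)
    (h : (c :: t).Pairwise (· ≤ ·)) :
    (t.dropWhile (· == c)).count c = 0 := by
  apply List.count_eq_zero_of_not_mem
  intro hmem
  cases hd : t.dropWhile (· == c) with
  | nil => simp [hd] at hmem
  | cons d r =>
    have hdne : (d == c) = false := by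
      have := List.head?_dropWhile_not (· == c) t
      rw [hd] at this
      simpa using this
    have hpw : (d :: r).Pairwise (· ≤ ·) :=
      List.Pairwise.sublist (hd ▸ ((t.dropWhile_sublist (· == c)).trans (List.sublist_cons_self c t))) h
    have hdt : d ∈ t := (t.dropWhile_sublist (· == c)).subset (by rw [hd]; exact List.mem_cons_self ..)
    have hcd : c ≤ d := List.rel_of_pairwise_cons h hdt
    have hlt : c < d := lt_of_le_of_ne hcd (fun h' => by simp [h'.symm] at hdne)
    rw [hd] at hmem
    rcases List.mem_cons.mp hmem with rfl | hmr
    · exact absurd rfl (ne_of_gt hlt)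
    · exact absurd (List.rel_of_pairwise_cons hpw hmr) (not_le.mpr hlt)

-- the initial run: every element of the takeWhile is c itself
lemma count_takeWhile (c : Char) (t : List Char) :
    (t.takeWhile (· == c)).count c = (t.takeWhile (· == c)).length := by
  rw [List.count_eq_length]
  intro b hb
  have hbc : (b == c) = true := List.mem_takeWhile_imp (p := fun x => x == c) hb
  exact (eq_of_beq hbc).symm

-- On a sorted list, B's run scan counts exactly the distinct characters with odd
-- multiplicity.
lemma oddRuns_sorted (t : List Char) (h : t.Pairwise (· ≤ ·)) :
    pvOddRuns t = (PySem.Set.ofList t).countP (fun c => decide (t.count c % 2 = 1)) := by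
  induction t using pvOddRuns.induct with
  | case1 => simp [pvOddRuns, PySem.Set.ofList]
  | case2 c t ih =>
    have hdropc : (t.dropWhile (· == c)).count c = 0 := count_dropWhile_zero c t h
    have hcnotin : c ∉ t.dropWhile (· == c) := by
      intro hmem
      have := List.count_pos_iff.mpr hmem
      omega
    have hdrop_pw : (t.dropWhile (· == c)).Pairwise (· ≤ ·) :=
      List.Pairwise.sublist
        ((t.dropWhile_sublist (· == c)).trans (List.sublist_cons_self c t)) h
    have hsplit : t = t.takeWhile (· == c) ++ t.dropWhile (· == c) :=
      (List.takeWhile_append_dropWhile).symm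
    have htake0 : ∀ x, x ≠ c → (t.takeWhile (· == c)).count x = 0 := by
      intro x hx
      apply List.count_eq_zero_of_not_mem
      intro hmem
      have hxc : (x == c) = true := List.mem_takeWhile_imp (p := fun x => x == c) hmem
      exact hx (eq_of_beq hxc)
    -- multiplicity of c in the whole list
    have hcountc : (c :: t).count c = 1 + (t.takeWhile (· == c)).length := by
      rw [List.count_cons_self]
      conv_lhs => rw [hsplit]
      rw [List.count_append, count_takeWhile, hdropc]
      omega
    -- multiplicity of any other char is unchanged by removing the run
    have hcount_other : ∀ x, x ≠ c →
        (c :: t).count x = (t.dropWhile (· == c)).count x := by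
      intro x hx
      rw [List.count_cons_of_ne (Ne.symm hx)]
      conv_lhs => rw [hsplit]
      rw [List.count_append, htake0 x hx]
      omega
    -- the distinct-element lists: ofList (c :: t) ~ c :: ofList (dropWhile)
    have hperm : (PySem.Set.ofList (c :: t)).Perm
        (c :: PySem.Set.ofList (t.dropWhile (· == c))) := by
      rw [List.perm_ext_iff_of_nodup (PySem.Set.nodup_ofList _)
          (List.nodup_cons.mpr ⟨by simpa [PySem.Set.mem_ofList] using hcnotin,
            PySem.Set.nodup_ofList _⟩)]
      intro x
      simp only [PySem.Set.mem_ofList, List.mem_cons]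
      constructor
      · rintro (rfl | hx)
        · exact Or.inl rfl
        · by_cases hxc : x = c
          · exact Or.inl hxc
          · refine Or.inr ?_
            have hxt : x ∈ t.takeWhile (· == c) ++ t.dropWhile (· == c) := by
              rw [← hsplit]; exact hx
            rcases List.mem_append.mp hxt with h1 | h2
            · have hx1 : (x == c) = true := List.mem_takeWhile_imp (p := fun x => x == c) h1
              exact absurd (eq_of_beq hx1) hxc
            · exact h2
      · rintro (rfl | hx)
        · exact Or.inl rfl
        · exact Or.inr ((t.dropWhile_sublist (· == c)).subset hx)
    rw [pvOddRuns, hperm.countP_eq]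
    rw [List.countP_cons]
    have hrec : (PySem.Set.ofList (t.dropWhile (· == c))).countP
          (fun x => decide ((c :: t).count x % 2 = 1))
        = (PySem.Set.ofList (t.dropWhile (· == c))).countP
          (fun x => decide ((t.dropWhile (· == c)).count x % 2 = 1)) := by
      apply List.countP_congr
      intro x hx
      have hxd : x ∈ t.dropWhile (· == c) := by
        simpa [PySem.Set.mem_ofList] using hx
      have hxc : x ≠ c := fun h' => hcnotin (h' ▸ hxd)
      rw [hcount_other x hxc]
    rw [hrec, ← ih hdrop_pw]
    have hdec : (decide ((c :: t).count c % 2 = 1) : Bool)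
        = decide ((1 + (t.takeWhile (· == c)).length) % 2 = 1) := by
      rw [hcountc]
    rw [hdec]
    rcases Nat.mod_two_eq_zero_or_one (1 + (t.takeWhile (· == c)).length) with h2 | h2
    · simp [h2]
    · simp [h2]
      omega

-- transfer from the sorted list back to the original character list
lemma oddRuns_eq_countP (l : List Char) :
    pvOddRuns (PySem.List.sorted l (fun c => c) false)
      = (PySem.Set.ofList l).countP (fun c => decide (l.count c % 2 = 1)) := by
  set t := PySem.List.sorted l (fun c => c) false with ht
  have hperm : t.Perm l := PySem.List.sorted_perm l _ _
  have hpw : t.Pairwise (· ≤ ·) := PySem.List.sorted_pairwise l (fun c => c)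
  rw [oddRuns_sorted t hpw]
  have h1 : (PySem.Set.ofList t).countP (fun c => decide (t.count c % 2 = 1))
      = (PySem.Set.ofList t).countP (fun c => decide (l.count c % 2 = 1)) := by
    apply List.countP_congr
    intro x _
    rw [hperm.count_eq]
  rw [h1]
  apply List.Perm.countP_eq
  rw [List.perm_ext_iff_of_nodup (PySem.Set.nodup_ofList _) (PySem.Set.nodup_ofList _)]
  intro x
  rw [PySem.Set.mem_ofList, PySem.Set.mem_ofList, hperm.mem_iff]

-- ===== VERDICT (by name: the statement is the Claim_ definition above) =====
theorem gameOfThrones_spec : Claim_equal_gameOfThrones := by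
  intro s _
  unfold Spec_gameOfThrones gameOfThrones gameOfThrones_alt
  rw [a_cnt_eq s.toList, ← oddRuns_eq_countP s.toList]
  set m := pvOddRuns (PySem.List.sorted s.toList (fun c => c) false)
  by_cases hm : m ≤ 1
  · have : ¬ ((m : Int) > 1) := by omega
    simp [hm, this]
  · have : (m : Int) > 1 := by omega
    simp [hm, this]
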